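-- pv_equiv track=rewrite | github.com/blizzarac/personal-assistant | skills/tasks/task_cli.py | compute_project_stats
-- ===== SOURCE A (Python) =====
-- from collections import defaultdict
--
-- def compute_project_stats(entries):
--     """Compute per-project counts of open/in-progress/blocked/done tasks."""
--     projects = defaultdict(lambda: {"open": 0, "in_progress": 0, "blocked": 0, "done": 0, "total": 0})
--     for e in entries:
--         project = e.get("Project", "") or "_unassigned"
--         status = e.get("Status", "open").lower().strip()
--         projects[project]["total"] += 1
--         if status in ("done", "completed", "closed"):
--             projects[project]["done"] += 1
--         elif status in ("in progress", "in_progress", "in-progress", "wip"):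
--             projects[project]["in_progress"] += 1
--         elif status in ("blocked", "waiting"):
--             projects[project]["blocked"] += 1
--         else:
--             # open, or any custom status text (e.g. "with Malte") counts as open
--             projects[project]["open"] += 1
--
--     stats = []
--     for project in sorted(projects.keys()):
--         data = projects[project]
--         stats.append({
--             "Project": project,
--             "Open": str(data["open"]),
--             "In Progress": str(data["in_progress"]),
--             "Blocked": str(data["blocked"]),
--             "Done": str(data["done"]),
--             "Total": str(data["total"]),
--         })
--     return stats
-- ===== SOURCE B (Python) =====
-- from collections import Counter
--
-- _CATEGORY = {
--     "done": "done", "completed": "done", "closed": "done",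
--     "in progress": "in_progress", "in_progress": "in_progress",
--     "in-progress": "in_progress", "wip": "in_progress",
--     "blocked": "blocked", "waiting": "blocked",
-- }
--
-- def compute_project_stats(entries):
--     """Compute per-project counts of open/in-progress/blocked/done tasks."""
--     groups = {}
--     for e in entries:
--         groups.setdefault(e.get("Project", "") or "_unassigned", []).append(e)
--     stats = []
--     for project in sorted(groups):
--         es = groups[project]
--         c = Counter(_CATEGORY.get(e.get("Status", "open").lower().strip(), "open")
--                     for e in es)
--         stats.append({
--             "Project": project,
--             "Open": str(c["open"]),
--             "In Progress": str(c["in_progress"]),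
--             "Blocked": str(c["blocked"]),
--             "Done": str(c["done"]),
--             "Total": str(len(es)),
--         })
--     return stats
-- ===== Notes on version B (the rewrite author's own statement) =====
-- stated objective: alternative
-- what changed: Replaced A's single-pass defaultdict of per-status counters updated through an if/elif chain by a two-phase group-then-aggregate: first group entries into lists per project, then for each sorted project tally a Counter over statuses normalized through a status->category lookup table.
import Mathlib
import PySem

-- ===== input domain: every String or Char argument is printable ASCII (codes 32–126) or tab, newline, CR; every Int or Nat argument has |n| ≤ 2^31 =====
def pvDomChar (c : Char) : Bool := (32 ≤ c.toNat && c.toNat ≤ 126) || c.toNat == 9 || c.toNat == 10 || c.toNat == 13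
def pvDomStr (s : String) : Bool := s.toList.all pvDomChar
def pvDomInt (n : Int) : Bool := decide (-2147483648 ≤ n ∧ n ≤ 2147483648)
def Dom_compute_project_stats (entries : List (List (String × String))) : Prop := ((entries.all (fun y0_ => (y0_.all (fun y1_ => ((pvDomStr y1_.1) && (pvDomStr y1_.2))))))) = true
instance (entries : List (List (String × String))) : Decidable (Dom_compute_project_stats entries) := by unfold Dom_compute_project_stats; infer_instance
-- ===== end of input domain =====

-- B is an alternative group-then-aggregate decomposition of A's single-pass tallying; equal results proved.
-- Each Python dict entry is the association list it denotes (first-match lookup via PySem.Dict.mk);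
-- A's inner fixed-key counter dict {"open","in_progress","blocked","done","total"} is represented
-- positionally as the 5-tuple (open, in_progress, blocked, done, total).

-- ===== PORT A =====
def compute_project_stats (entries : List (List (String × String))) : List (List (String × String)) :=
  let projects : PySem.Dict String (Int × Int × Int × Int × Int) :=
    entries.foldl (fun projects e =>
      let project := if (PySem.Dict.mk e).getD "Project" "" = "" then "_unassigned"
                     else (PySem.Dict.mk e).getD "Project" ""
      let status := PySem.Str.strip (PySem.Str.lower ((PySem.Dict.mk e).getD "Status" "open"))
      let d := projects.getD project (0, 0, 0, 0, 0)
      let d := (d.1, d.2.1, d.2.2.1, d.2.2.2.1, d.2.2.2.2 + 1)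
      let d :=
        if status = "done" ∨ status = "completed" ∨ status = "closed" then
          (d.1, d.2.1, d.2.2.1, d.2.2.2.1 + 1, d.2.2.2.2)
        else if status = "in progress" ∨ status = "in_progress" ∨ status = "in-progress" ∨ status = "wip" then
          (d.1, d.2.1 + 1, d.2.2.1, d.2.2.2.1, d.2.2.2.2)
        else if status = "blocked" ∨ status = "waiting" then
          (d.1, d.2.1, d.2.2.1 + 1, d.2.2.2.1, d.2.2.2.2)
        else
          (d.1 + 1, d.2.1, d.2.2.1, d.2.2.2.1, d.2.2.2.2)
      projects.insert project d) PySem.Dict.empty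
  (PySem.List.sorted projects.keys (fun x => x) false).foldl (fun stats project =>
    let data := projects.getD project (0, 0, 0, 0, 0)
    stats ++ [[("Project", project),
               ("Open", PySem.Int.toStr data.1),
               ("In Progress", PySem.Int.toStr data.2.1),
               ("Blocked", PySem.Int.toStr data.2.2.1),
               ("Done", PySem.Int.toStr data.2.2.2.1),
               ("Total", PySem.Int.toStr data.2.2.2.2)]]) []

-- ===== PORT B =====
-- _CATEGORY: status synonym -> category lookup table
def pvCategory : PySem.Dict String String :=
  PySem.Dict.ofList
    [("done", "done"), ("completed", "done"), ("closed", "done"),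
     ("in progress", "in_progress"), ("in_progress", "in_progress"),
     ("in-progress", "in_progress"), ("wip", "in_progress"),
     ("blocked", "blocked"), ("waiting", "blocked")]

def compute_project_stats_alt (entries : List (List (String × String))) : List (List (String × String)) :=
  -- groups.setdefault(key, []).append(e) is ported as Dict.modify key [] (· ++ [e])
  let groups : PySem.Dict String (List (List (String × String))) :=
    entries.foldl (fun groups e =>
      groups.modify (if (PySem.Dict.mk e).getD "Project" "" = "" then "_unassigned"
                     else (PySem.Dict.mk e).getD "Project" "") [] (fun es => es ++ [e]))
      PySem.Dict.empty
  (PySem.List.sorted groups.keys (fun x => x) false).map (fun project =>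
    let es := groups.getD project []
    let c := PySem.Dict.counter (es.map (fun e =>
      pvCategory.getD (PySem.Str.strip (PySem.Str.lower ((PySem.Dict.mk e).getD "Status" "open"))) "open"))
    [("Project", project),
     ("Open", PySem.Int.toStr (c.getD "open" 0)),
     ("In Progress", PySem.Int.toStr (c.getD "in_progress" 0)),
     ("Blocked", PySem.Int.toStr (c.getD "blocked" 0)),
     ("Done", PySem.Int.toStr (c.getD "done" 0)),
     ("Total", PySem.Int.toStr (PySem.List.len es))])

-- ===== PRECONDITION & SPEC =====
def Spec_compute_project_stats (entries : List (List (String × String))) (out : List (List (String × String))) : Prop := out = compute_project_stats_alt entries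
instance (entries : List (List (String × String))) (out : List (List (String × String))) : Decidable (Spec_compute_project_stats entries out) := by unfold Spec_compute_project_stats; infer_instance

-- ===== CLAIM (what is proved, stated in full; the proofs are below) =====
def Claim_equal_compute_project_stats : Prop := ∀ (entries : List (List (String × String))), Dom_compute_project_stats entries → Spec_compute_project_stats entries (compute_project_stats entries)

-- ===== LEMMAS AND PROOFS =====

-- Key / normalized status / category of one entry (proof-side abbreviations of the
-- identical subexpressions both ports contain)
def pvKey (e : List (String × String)) : String :=
  if (PySem.Dict.mk e).getD "Project" "" = "" then "_unassigned" else (PySem.Dict.mk e).getD "Project" ""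

def pvStatus (e : List (String × String)) : String :=
  PySem.Str.strip (PySem.Str.lower ((PySem.Dict.mk e).getD "Status" "open"))

def pvCat (e : List (String × String)) : String :=
  if pvStatus e = "done" ∨ pvStatus e = "completed" ∨ pvStatus e = "closed" then "done"
  else if pvStatus e = "in progress" ∨ pvStatus e = "in_progress" ∨ pvStatus e = "in-progress" ∨ pvStatus e = "wip" then "in_progress"
  else if pvStatus e = "blocked" ∨ pvStatus e = "waiting" then "blocked"
  else "open"

def pvZ : Int × Int × Int × Int × Int := (0, 0, 0, 0, 0)

def pvBump (c : String) (t : Int × Int × Int × Int × Int) : Int × Int × Int × Int × Int :=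
  if c = "done" then (t.1, t.2.1, t.2.2.1, t.2.2.2.1 + 1, t.2.2.2.2 + 1)
  else if c = "in_progress" then (t.1, t.2.1 + 1, t.2.2.1, t.2.2.2.1, t.2.2.2.2 + 1)
  else if c = "blocked" then (t.1, t.2.1, t.2.2.1 + 1, t.2.2.2.1, t.2.2.2.2 + 1)
  else (t.1 + 1, t.2.1, t.2.2.1, t.2.2.2.1, t.2.2.2.2 + 1)

def pvAdd (t u : Int × Int × Int × Int × Int) : Int × Int × Int × Int × Int :=
  (t.1 + u.1, t.2.1 + u.2.1, t.2.2.1 + u.2.2.1, t.2.2.2.1 + u.2.2.2.1, t.2.2.2.2 + u.2.2.2.2)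

def pvTally (l : List (List (String × String))) : Int × Int × Int × Int × Int :=
  (((l.map pvCat).count "open" : Int), ((l.map pvCat).count "in_progress" : Int),
   ((l.map pvCat).count "blocked" : Int), ((l.map pvCat).count "done" : Int), (l.length : Int))

def pvRow (project : String) (d : Int × Int × Int × Int × Int) : List (String × String) :=
  [("Project", project), ("Open", PySem.Int.toStr d.1), ("In Progress", PySem.Int.toStr d.2.1),
   ("Blocked", PySem.Int.toStr d.2.2.1), ("Done", PySem.Int.toStr d.2.2.2.1),
   ("Total", PySem.Int.toStr d.2.2.2.2)]

-- A's accumulated dict is the fold of insert (pvKey e) (pvBump (pvCat e) ·)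
theorem pv_A_eq (entries : List (List (String × String))) :
    compute_project_stats entries =
    (PySem.List.sorted
        (entries.foldl (fun d e => d.insert (pvKey e) (pvBump (pvCat e) (d.getD (pvKey e) pvZ))) PySem.Dict.empty).keys
        (fun x => x) false).foldl
      (fun stats project =>
        stats ++ [pvRow project
          ((entries.foldl (fun d e => d.insert (pvKey e) (pvBump (pvCat e) (d.getD (pvKey e) pvZ))) PySem.Dict.empty).getD project pvZ)]) [] := by
  have hlam : (fun (projects : PySem.Dict String (Int × Int × Int × Int × Int)) (e : List (String × String)) =>
      let project := if (PySem.Dict.mk e).getD "Project" "" = "" then "_unassigned"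
                     else (PySem.Dict.mk e).getD "Project" ""
      let status := PySem.Str.strip (PySem.Str.lower ((PySem.Dict.mk e).getD "Status" "open"))
      let d := projects.getD project (0, 0, 0, 0, 0)
      let d := (d.1, d.2.1, d.2.2.1, d.2.2.2.1, d.2.2.2.2 + 1)
      let d :=
        if status = "done" ∨ status = "completed" ∨ status = "closed" then
          (d.1, d.2.1, d.2.2.1, d.2.2.2.1 + 1, d.2.2.2.2)
        else if status = "in progress" ∨ status = "in_progress" ∨ status = "in-progress" ∨ status = "wip" then
          (d.1, d.2.1 + 1, d.2.2.1, d.2.2.2.1, d.2.2.2.2)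
        else if status = "blocked" ∨ status = "waiting" then
          (d.1, d.2.1, d.2.2.1 + 1, d.2.2.2.1, d.2.2.2.2)
        else
          (d.1 + 1, d.2.1, d.2.2.1, d.2.2.2.1, d.2.2.2.2)
      projects.insert project d)
      = (fun d e => d.insert (pvKey e) (pvBump (pvCat e) (d.getD (pvKey e) pvZ))) := by
    funext projects e
    dsimp only [pvKey, pvCat, pvStatus, pvBump, pvZ]
    split_ifs <;> simp_all
  rw [compute_project_stats, hlam]
  rfl

theorem pvCat_cases (e : List (String × String)) :
    pvCat e = "done" ∨ pvCat e = "in_progress" ∨ pvCat e = "blocked" ∨ pvCat e = "open" := by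
  unfold pvCat; split_ifs <;> simp

theorem pvAdd_zero_right (t : Int × Int × Int × Int × Int) : pvAdd t pvZ = t := by
  obtain ⟨a, b, c, d, e⟩ := t; simp [pvAdd, pvZ]

theorem pvAdd_zero_left (t : Int × Int × Int × Int × Int) : pvAdd pvZ t = t := by
  obtain ⟨a, b, c, d, e⟩ := t; simp [pvAdd, pvZ]

theorem pvTally_nil : pvTally [] = pvZ := by simp [pvTally, pvZ]

theorem pvTally_cons (e : List (String × String)) (r : List (List (String × String))) :
    pvTally (e :: r) = pvBump (pvCat e) (pvTally r) := by
  rcases pvCat_cases e with h | h | h | h <;> simp [pvTally, pvBump, h]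

theorem pvAdd_bump (c : String) (t u : Int × Int × Int × Int × Int) :
    pvAdd (pvBump c t) u = pvAdd t (pvBump c u) := by
  obtain ⟨a, b, c', d, e⟩ := t; obtain ⟨a', b', c'', d', e'⟩ := u
  unfold pvBump pvAdd; split_ifs <;> simp <;> ring_nf <;> exact ⟨trivial, trivial⟩

-- A's per-project tuple is the category tally of the entries with that key
theorem pv_foldA_getD (l : List (List (String × String)))
    (d : PySem.Dict String (Int × Int × Int × Int × Int)) (p : String) :
    (l.foldl (fun d e => d.insert (pvKey e) (pvBump (pvCat e) (d.getD (pvKey e) pvZ))) d).getD p pvZ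
    = pvAdd (d.getD p pvZ) (pvTally (l.filter (fun e => pvKey e == p))) := by
  induction l generalizing d with
  | nil => simp [pvTally_nil, pvAdd_zero_right]
  | cons e es ih =>
    simp only [List.foldl_cons, List.filter_cons]
    rw [ih]
    by_cases h : pvKey e = p
    · simp only [h, beq_self_eq_true, if_pos, PySem.Dict.getD_insert_self, pvTally_cons, pvAdd_bump]
    · have hb : (pvKey e == p) = false := by simp [h]
      rw [hb, PySem.Dict.getD_insert_of_ne _ _ _ (Ne.symm h)]
      simp

-- B's group of a project is the sublist of entries with that key
theorem pv_foldB_getD (l : List (List (String × String)))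
    (d : PySem.Dict String (List (List (String × String)))) (p : String) :
    (l.foldl (fun g e => g.modify (pvKey e) [] (fun es => es ++ [e])) d).getD p []
    = d.getD p [] ++ l.filter (fun e => pvKey e == p) := by
  rw [← List.foldl_map (f := fun e => (pvKey e, e))
        (g := fun (g : PySem.Dict String (List (List (String × String)))) (q : String × List (String × String)) =>
          g.modify q.1 [] (fun es => es ++ [q.2]))]
  rw [PySem.Dict.getD_foldl_modify_append]
  rw [List.filter_map]
  simp [List.map_map, Function.comp_def]

-- the lookup table computes A's if/elif categorisation
theorem pvCat_lookup (e : List (String × String)) :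
    pvCategory.getD (pvStatus e) "open" = pvCat e := by
  unfold pvCat
  generalize pvStatus e = s
  simp only [pvCategory, PySem.Dict.ofList, PySem.Dict.update, List.foldl,
    PySem.Dict.getD_insert, PySem.Dict.getD_empty]
  split_ifs <;> simp_all

-- ===== VERDICT (by name: the statement is the Claim_ definition above) =====
theorem compute_project_stats_spec : Claim_equal_compute_project_stats := by
  intro entries _
  unfold Spec_compute_project_stats
  rw [pv_A_eq, PySem.List.foldl_append_singleton_eq_map, List.nil_append]
  have hB : compute_project_stats_alt entries =
      (PySem.List.sorted
          (entries.foldl (fun g e => g.modify (pvKey e) [] (fun es => es ++ [e])) PySem.Dict.empty).keys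
          (fun x => x) false).map
        (fun project =>
          let es := (entries.foldl (fun g e => g.modify (pvKey e) [] (fun es => es ++ [e])) PySem.Dict.empty).getD project []
          let c := PySem.Dict.counter (es.map (fun e => pvCategory.getD (pvStatus e) "open"))
          [("Project", project), ("Open", PySem.Int.toStr (c.getD "open" 0)),
           ("In Progress", PySem.Int.toStr (c.getD "in_progress" 0)),
           ("Blocked", PySem.Int.toStr (c.getD "blocked" 0)),
           ("Done", PySem.Int.toStr (c.getD "done" 0)),
           ("Total", PySem.Int.toStr (PySem.List.len es))]) := rfl
  rw [hB]
  have h1 : (entries.foldl (fun d e => d.insert (pvKey e) (pvBump (pvCat e) (d.getD (pvKey e) pvZ))) PySem.Dict.empty).keys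
      = PySem.Set.update (PySem.Dict.empty (κ := String) (ν := Int × Int × Int × Int × Int)).keys (entries.map pvKey) :=
    PySem.Dict.keys_foldl_insert_key entries pvKey _ _
  have h2 : (entries.foldl (fun g e => g.modify (pvKey e) [] (fun es => es ++ [e])) PySem.Dict.empty).keys
      = PySem.Set.update (PySem.Dict.empty (κ := String) (ν := List (List (String × String)))).keys (entries.map pvKey) :=
    PySem.Dict.keys_foldl_modify_key entries pvKey [] _ _
  rw [PySem.Dict.keys_empty] at h1 h2
  rw [h1, h2]
  apply List.map_congr_left
  intro p _
  rw [pv_foldA_getD, pv_foldB_getD, PySem.Dict.getD_empty, PySem.Dict.getD_empty,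
    pvAdd_zero_left, List.nil_append]
  have hcat : ((entries.filter (fun e => pvKey e == p)).map (fun e => pvCategory.getD (pvStatus e) "open"))
      = (entries.filter (fun e => pvKey e == p)).map pvCat :=
    List.map_congr_left (fun e _ => pvCat_lookup e)
  dsimp only
  rw [hcat]
  simp [pvRow, pvTally, PySem.Dict.getD_counter, PySem.List.len_eq]
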